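-- pv_equiv track=rewrite | github.com/GaznavieAhad12/CodeChef-DAA | 7_Backtracking/2_Hamiltonian Circuit Problem/3_Satisfying the Constraints/Main.py | hamiltonian_circuit
-- ===== SOURCE A (Python) =====
-- def check(v, next_v, circuit, mat):
--     # Check if 'next_v' vertex can be added after vertex 'v'
--     if not mat[v][next_v] or next_v in circuit:
--         return False
--     return True
--
-- def backtrack(v, n, circuit, ans, mat):
--     if len(circuit) == n:  # Circuit is completed
--         if mat[circuit[0]][v]:  # Check if cycle is completed, starting should be adjacent to ending
--             circuit.append(circuit[0])
--             ans.append(list(circuit))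
--             circuit.pop()
--         return
--
--     for i in range(1, n + 1):
--         # Calling the check function
--         if not check(v, i, circuit, mat):
--             continue
--
--         # If not visited and is adjacent, add it to our candidate solution
--         circuit.append(i)
--         backtrack(i, n, circuit, ans, mat)
--         circuit.pop()
--
-- def hamiltonian_circuit(n, mat):
--     circuit = []  # Initially empty circuit
--     ans = []  # To store all the circuits
--
--     for i in range(1, n + 1):  # Fix the starting vertex
--         circuit.append(i)  # Add i to circuit
--         backtrack(i, n, circuit, ans, mat)
--         circuit.pop()  # Remove i from circuit
--
--     return ans
-- ===== SOURCE B (Python) =====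
-- from itertools import permutations
--
-- def hamiltonian_circuit(n, mat):
--     # Generate-and-test: try every permutation of vertices 1..n in lexicographic
--     # order (same order the DFS backtracking explores) and keep those whose
--     # consecutive vertices are adjacent and whose ends are joined by an edge.
--     if n < 1:
--         return []
--     ans = []
--     for perm in permutations(range(1, n + 1)):
--         if all(mat[perm[k]][perm[k + 1]] for k in range(n - 1)) and mat[perm[0]][perm[-1]]:
--             ans.append(list(perm) + [perm[0]])
--     return ans
-- ===== Notes on version B (the rewrite author's own statement) =====
-- stated objective: idiomatic
-- what changed: Replaces the recursive DFS backtracking with an itertools.permutations generate-and-test: every permutation of 1..n (lexicographic order, matching the DFS emission order) is kept iff all consecutive edges and the closing edge are present.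
import Mathlib
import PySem

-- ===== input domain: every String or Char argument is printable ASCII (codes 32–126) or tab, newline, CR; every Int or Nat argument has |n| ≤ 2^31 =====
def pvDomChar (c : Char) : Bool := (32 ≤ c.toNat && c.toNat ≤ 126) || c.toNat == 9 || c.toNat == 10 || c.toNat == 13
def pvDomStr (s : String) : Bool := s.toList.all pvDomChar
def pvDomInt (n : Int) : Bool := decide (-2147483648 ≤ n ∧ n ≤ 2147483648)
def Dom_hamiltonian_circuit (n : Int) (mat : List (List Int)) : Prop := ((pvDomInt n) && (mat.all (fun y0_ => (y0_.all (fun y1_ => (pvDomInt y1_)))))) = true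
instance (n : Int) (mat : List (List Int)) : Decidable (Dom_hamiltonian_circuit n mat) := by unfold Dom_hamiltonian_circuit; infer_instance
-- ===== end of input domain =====

-- B replaces A's recursive DFS backtracking by a generate-and-test over all permutations
-- of 1..n in lexicographic order (itertools.permutations); same return value, idiomatic style.

-- ===== PORT A =====
-- mat[v][w]: inside Pre_ every used index is in range, so the .getD defaults are never taken
def pvGet2 (mat : List (List Int)) (v w : Int) : Int :=
  (PySem.List.pyGet? ((PySem.List.pyGet? mat v).getD []) w).getD 0

def pvCheck (v i : Int) (circuit : List Int) (mat : List (List Int)) : Bool :=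
  if pvGet2 mat v i == 0 || circuit.contains i then false else true

-- fuel = recursion depth bound; from the top-level call n.toNat is always enough (proved below)
def pvBacktrack (mat : List (List Int)) : Nat → Int → Int → List Int → List (List Int) → List (List Int)
  | 0, _, _, _, ans => ans
  | fuel+1, v, n, circuit, ans =>
    if (circuit.length : Int) = n then
      if pvGet2 mat (circuit.headD 0) v ≠ 0 then ans ++ [circuit ++ [circuit.headD 0]] else ans
    else
      (PySem.List.pyRange 1 (n+1) 1).foldl
        (fun ans i => if pvCheck v i circuit mat then pvBacktrack mat fuel i n (circuit ++ [i]) ans else ans) ans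

def hamiltonian_circuit (n : Int) (mat : List (List Int)) : List (List Int) :=
  (PySem.List.pyRange 1 (n+1) 1).foldl (fun ans i => pvBacktrack mat n.toNat i n [i] ans) []

-- ===== PORT B =====
-- itertools.permutations of a duplicate-free list, in its emission (lexicographic) order
def pvLexPerms : List Int → List (List Int)
  | [] => [[]]
  | x :: xs => (x :: xs).attach.flatMap (fun y => (pvLexPerms ((x :: xs).erase y.1)).map (y.1 :: ·))
termination_by xs => xs.length
decreasing_by
  have h := List.length_erase_of_mem y.2
  simp only [h, List.length_cons]
  omega

-- all(mat[p[k]][p[k+1]] for consecutive k)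
def pvPathOk (mat : List (List Int)) : List Int → Bool
  | [] => true
  | [_] => true
  | a :: b :: rest => (pvGet2 mat a b != 0) && pvPathOk mat (b :: rest)

def pvGoodPerm (mat : List (List Int)) (p : List Int) : Bool :=
  pvPathOk mat p && (pvGet2 mat (p.headD 0) (p.getLastD 0) != 0)

def hamiltonian_circuit_alt (n : Int) (mat : List (List Int)) : List (List Int) :=
  if n < 1 then [] else
  (pvLexPerms (PySem.List.pyRange 1 (n+1) 1)).foldl
    (fun ans p => if pvGoodPerm mat p then ans ++ [p ++ [p.headD 0]] else ans) []

-- ===== PRECONDITION & SPEC =====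
-- A indexes mat[v][w] only for vertices v,w in 1..n; Pre_ demands those rows/columns exist
-- (rows other than 1..n are never touched), i.e. exactly where Python A returns without an IndexError.
def Pre_hamiltonian_circuit (n : Int) (mat : List (List Int)) : Prop :=
  n < 1 ∨ (n < (mat.length : Int) ∧ ∀ r ∈ (mat.take (n.toNat + 1)).drop 1, n < (r.length : Int))
instance (n : Int) (mat : List (List Int)) : Decidable (Pre_hamiltonian_circuit n mat) := by
  unfold Pre_hamiltonian_circuit; infer_instance

def pvWitness_hamiltonian_circuit : Int × List (List Int) :=
  (3, [[0,0,0,0],[0,0,1,1],[0,1,0,1],[0,1,1,0]])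

def Spec_hamiltonian_circuit (n : Int) (mat : List (List Int)) (out : List (List Int)) : Prop := out = hamiltonian_circuit_alt n mat
instance (n : Int) (mat : List (List Int)) (out : List (List Int)) : Decidable (Spec_hamiltonian_circuit n mat out) := by unfold Spec_hamiltonian_circuit; infer_instance

-- ===== CLAIM (what is proved, stated in full; the proofs are below) =====
def Claim_equal_hamiltonian_circuit : Prop := ∀ (n : Int) (mat : List (List Int)), Dom_hamiltonian_circuit n mat → Pre_hamiltonian_circuit n mat → Spec_hamiltonian_circuit n mat (hamiltonian_circuit n mat)

-- ===== LEMMAS AND PROOFS =====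

-- backtrack with the accumulator stripped off
def pvExt (mat : List (List Int)) (fuel : Nat) (v n : Int) (circuit : List Int) : List (List Int) :=
  pvBacktrack mat fuel v n circuit []

-- the test B applies to the not-yet-chosen tail `rest` of a permutation, after v, with start `head`
def pvGoodFrom (mat : List (List Int)) (head v : Int) (rest : List Int) : Bool :=
  pvPathOk mat (v :: rest) && (pvGet2 mat head ((v :: rest).getLastD 0) != 0)

theorem pv_foldl_acc {α β : Type} (f : List α → β → List α)
    (h : ∀ acc x, f acc x = acc ++ f [] x) :
    ∀ (l : List β) (acc : List α), l.foldl f acc = acc ++ l.foldl f [] := by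
  intro l
  induction l with
  | nil => intro acc; simp
  | cons x l ih =>
    intro acc
    simp only [List.foldl_cons]
    rw [ih (f acc x), ih (f [] x), h acc x, List.append_assoc]

theorem pvBacktrack_acc (mat : List (List Int)) :
    ∀ (fuel : Nat) (v n : Int) (circuit : List Int) (ans : List (List Int)),
      pvBacktrack mat fuel v n circuit ans = ans ++ pvExt mat fuel v n circuit := by
  intro fuel
  induction fuel with
  | zero => intro v n circuit ans; simp [pvBacktrack, pvExt]
  | succ fuel ih =>
    intro v n circuit ans
    by_cases hl : (circuit.length : Int) = n
    · simp only [pvBacktrack, pvExt, if_pos hl]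
      split <;> simp
    · simp only [pvBacktrack, pvExt, if_neg hl]
      rw [pv_foldl_acc]
      intro acc x
      split
      · rw [ih, ih _ _ _ ([] : List (List Int))]; simp
      · simp

theorem pvExt_succ_else (mat : List (List Int)) (fuel : Nat) (v n : Int) (circuit : List Int)
    (h : (circuit.length : Int) ≠ n) :
    pvExt mat (fuel+1) v n circuit =
      (PySem.List.pyRange 1 (n+1) 1).flatMap
        (fun i => if pvCheck v i circuit mat then pvExt mat fuel i n (circuit ++ [i]) else []) := by
  show pvBacktrack mat (fuel+1) v n circuit [] = _
  simp only [pvBacktrack, if_neg h]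
  have hfun : (fun (ans : List (List Int)) i =>
        if pvCheck v i circuit mat then pvBacktrack mat fuel i n (circuit ++ [i]) ans else ans)
      = (fun ans i => ans ++ (if pvCheck v i circuit mat then pvExt mat fuel i n (circuit ++ [i]) else [])) := by
    funext ans i
    split
    · rw [pvBacktrack_acc]
    · simp
  rw [hfun, PySem.List.foldl_append_eq_flatMap]
  simp

theorem pv_flatMap_filter_of_nil {α β : Type} (p : α → Bool) (f : α → List β) :
    ∀ l : List α, (∀ x ∈ l, p x = false → f x = []) → l.flatMap f = (l.filter p).flatMap f := by
  intro l
  induction l with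
  | nil => intro _; rfl
  | cons x l ih =>
    intro h
    by_cases hx : p x = true
    · simp only [List.flatMap_cons, List.filter_cons, hx, if_true]
      rw [ih (fun y hy => h y (List.mem_cons_of_mem _ hy))]
    · have hx' : p x = false := by revert hx; cases p x <;> simp
      simp only [List.flatMap_cons, List.filter_cons, hx', h x (List.mem_cons_self) hx', Bool.false_eq_true, if_false]
      rw [ih (fun y hy => h y (List.mem_cons_of_mem _ hy))]
      simp

theorem pv_flatMap_congr {α β : Type} (f g : α → List β) :
    ∀ l : List α, (∀ x ∈ l, f x = g x) → l.flatMap f = l.flatMap g := by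
  intro l
  induction l with
  | nil => intro _; rfl
  | cons x l ih =>
    intro h
    simp only [List.flatMap_cons, h x List.mem_cons_self,
      ih (fun y hy => h y (List.mem_cons_of_mem _ hy))]

theorem pvLexPerms_of_ne_nil (l : List Int) (h : l ≠ []) :
    pvLexPerms l = l.flatMap (fun y => (pvLexPerms (l.erase y)).map (y :: ·)) := by
  cases l with
  | nil => exact absurd rfl h
  | cons x xs =>
    rw [pvLexPerms]
    simp [List.flatMap_def]

theorem pv_headD_append (circuit : List Int) (y d : Int) (h : circuit ≠ []) :
    (circuit ++ [y]).headD d = circuit.headD d := by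
  cases circuit with
  | nil => exact absurd rfl h
  | cons a l => rfl

-- the heart: A's pruned DFS from a partial circuit = B's filter over lex permutations of the
-- remaining vertices
theorem pvExt_spec (mat : List (List Int)) :
    ∀ (fuel : Nat) (v n : Int) (circuit : List Int),
      circuit ≠ [] →
      ((circuit.length : Int) + (((PySem.List.pyRange 1 (n+1) 1).filter (fun x => !circuit.contains x)).length : Int) = n) →
      ((PySem.List.pyRange 1 (n+1) 1).filter (fun x => !circuit.contains x)).length < fuel →
      pvExt mat fuel v n circuit =
        (((pvLexPerms ((PySem.List.pyRange 1 (n+1) 1).filter (fun x => !circuit.contains x))).filter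
          (pvGoodFrom mat (circuit.headD 0) v)).map (fun rest => circuit ++ rest ++ [circuit.headD 0])) := by
  intro fuel
  induction fuel with
  | zero => intro v n circuit _ _ hfuel; omega
  | succ fuel ih =>
    intro v n circuit hne hsum hfuel
    set S := (PySem.List.pyRange 1 (n+1) 1).filter (fun x => !circuit.contains x) with hS
    by_cases hlen : (circuit.length : Int) = n
    · have hS0 : S = [] := List.length_eq_zero_iff.mp (by omega)
      rw [hS0]
      show pvBacktrack mat (fuel+1) v n circuit [] = _
      simp only [pvBacktrack, if_pos hlen]
      simp only [pvLexPerms, List.filter_cons, List.filter_nil]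
      simp only [pvGoodFrom, pvPathOk]
      by_cases he : pvGet2 mat (circuit.headD 0) v = 0
      · rw [if_neg (show ¬(pvGet2 mat (circuit.headD 0) v ≠ 0) from fun hc => hc he)]
        simp only [List.headD_eq_head?_getD] at he
        simp [he]
      · rw [if_pos (show pvGet2 mat (circuit.headD 0) v ≠ 0 from he)]
        simp only [List.headD_eq_head?_getD] at he
        simp [he]
    · have hSnd : S.Nodup := List.Nodup.filter _ (PySem.List.nodup_pyRange_one 1 (n+1))
      have hSne : S ≠ [] := by
        intro h0
        rw [h0] at hsum
        simp at hsum
        omega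
      rw [pvExt_succ_else mat fuel v n circuit hlen]
      rw [pv_flatMap_filter_of_nil (fun x => !circuit.contains x) _ _
        (by
          intro x _ hpx
          have hxm : x ∈ circuit := by simpa using hpx
          have hchk : pvCheck v x circuit mat = false := by simp [pvCheck, hxm]
          simp [hchk])]
      rw [← hS, pvLexPerms_of_ne_nil S hSne, List.filter_flatMap, List.map_flatMap]
      apply pv_flatMap_congr
      intro y hyS
      have hymem := List.mem_filter.mp (hS ▸ hyS)
      have hyr : y ∈ PySem.List.pyRange 1 (n+1) 1 := hymem.1
      have hync : circuit.contains y = false := by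
        have := hymem.2
        revert this
        cases circuit.contains y <;> simp
      have hS' : (PySem.List.pyRange 1 (n+1) 1).filter (fun x => !(circuit ++ [y]).contains x)
          = S.erase y := by
        rw [List.Nodup.erase_eq_filter hSnd y, hS, List.filter_filter]
        apply List.filter_congr
        intro x _
        by_cases hxy : x = y
        · subst hxy; simp
        · simp [hxy]
      have hSpos : 0 < S.length := List.length_pos_of_mem hyS
      have hylen : (S.erase y).length = S.length - 1 := List.length_erase_of_mem hyS
      rw [List.filter_map, List.map_map]
      by_cases hedge : pvGet2 mat v y = 0
      · have hchk : pvCheck v y circuit mat = false := by simp [pvCheck, hedge]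
        have hfilt : (pvLexPerms (S.erase y)).filter (pvGoodFrom mat (circuit.headD 0) v ∘ (y :: ·)) = [] := by
          apply List.filter_eq_nil_iff.mpr
          intro rest _
          simp [Function.comp, pvGoodFrom, pvPathOk, hedge]
        rw [hfilt]
        simp [hchk]
      · have hyn : y ∉ circuit := by simpa using hync
        have hchk : pvCheck v y circuit mat = true := by simp [pvCheck, hedge, hyn]
        rw [hchk]
        simp only [if_true]
        rw [ih y n (circuit ++ [y]) (by simp) (by rw [hS']; simp only [List.length_append, List.length_cons, List.length_nil]; omega) (by rw [hS']; omega)]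
        rw [hS', pv_headD_append circuit y 0 hne]
        have hpred : ∀ rest ∈ pvLexPerms (S.erase y),
            pvGoodFrom mat (circuit.headD 0) y rest = (pvGoodFrom mat (circuit.headD 0) v ∘ (y :: ·)) rest := by
          intro rest _
          have hb : (pvGet2 mat v y != 0) = true := by simpa using hedge
          simp [Function.comp, pvGoodFrom, pvPathOk, hb]
        rw [List.filter_congr hpred]
        apply List.map_congr_left
        intro rest _
        simp

-- ===== VERDICT (by name: the statement is the Claim_ definition above) =====
theorem hamiltonian_circuit_spec : Claim_equal_hamiltonian_circuit := by
  intro n mat _ _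
  unfold Spec_hamiltonian_circuit hamiltonian_circuit hamiltonian_circuit_alt
  by_cases hn : n < 1
  · rw [if_pos hn, PySem.List.pyRange_one_eq_nil (by omega)]
    rfl
  · rw [if_neg hn]
    have hA : (fun (ans : List (List Int)) i => pvBacktrack mat n.toNat i n [i] ans)
        = fun ans i => ans ++ pvExt mat n.toNat i n [i] := by
      funext ans i
      rw [pvBacktrack_acc]
    rw [hA, PySem.List.foldl_append_eq_flatMap, List.nil_append]
    rw [PySem.List.foldl_append_if, List.nil_append]
    have hrne : PySem.List.pyRange 1 (n+1) 1 ≠ [] := by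
      have h1 : (1:Int) ∈ PySem.List.pyRange 1 (n+1) 1 :=
        PySem.List.mem_pyRange_one.mpr ⟨le_refl 1, by omega⟩
      intro h0
      rw [h0] at h1
      simp at h1
    rw [pvLexPerms_of_ne_nil _ hrne, List.filter_flatMap, List.map_flatMap]
    apply pv_flatMap_congr
    intro i hi
    have hi' := PySem.List.mem_pyRange_one.mp hi
    have hnd := PySem.List.nodup_pyRange_one 1 (n+1)
    have hSi : (PySem.List.pyRange 1 (n+1) 1).filter (fun x => !([i] : List Int).contains x)
        = (PySem.List.pyRange 1 (n+1) 1).erase i := by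
      rw [List.Nodup.erase_eq_filter hnd i]
      apply List.filter_congr
      intro x _
      by_cases hxy : x = i
      · subst hxy; simp
      · simp [hxy]
    have hlenr : (PySem.List.pyRange 1 (n+1) 1).length = n.toNat := by
      rw [PySem.List.length_pyRange_one]
      omega
    have hleni : ((PySem.List.pyRange 1 (n+1) 1).erase i).length = n.toNat - 1 := by
      rw [List.length_erase_of_mem hi, hlenr]
    have hpos : 0 < n.toNat := by omega
    rw [pvExt_spec mat n.toNat i n [i] (by simp)
      (by rw [hSi]; simp only [List.length_cons, List.length_nil, hleni]; omega)
      (by rw [hSi, hleni]; omega)]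
    rw [hSi, List.filter_map, List.map_map]
    have hpred : ∀ rest ∈ pvLexPerms ((PySem.List.pyRange 1 (n+1) 1).erase i),
        pvGoodFrom mat (([i] : List Int).headD 0) i rest = (pvGoodPerm mat ∘ (i :: ·)) rest := by
      intro rest _
      simp [Function.comp, pvGoodFrom, pvGoodPerm]
    rw [List.filter_congr hpred]
    apply List.map_congr_left
    intro rest _
    simp
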